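-- pv_equiv track=rewrite | github.com/Leo-Hsu-Design-Student/2020-Fall-Computer-Programming-Design-Python | computer_programming_design/final_exam/min_removals.py | min_removals
-- ===== SOURCE A (Python) =====
-- def min_removals(str1,str2):
--     remove=0
--     for i in range(len(str1)):
--         if str1[i] not in str2:
--             str1.replace(str1[i],"")
--             remove+=1
--     for i in range(len(str2)):
--         if str2[i] not in str1:
--             str2.replace(str2[i],"")
--             remove+=1
--     return remove
-- ===== SOURCE B (Python) =====
-- def min_removals(str1, str2):
--     s1, s2 = set(str1), set(str2)
--     return sum(str1.count(c) for c in s1 - s2) + sum(str2.count(c) for c in s2 - s1)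
-- ===== Notes on version B (the rewrite author's own statement) =====
-- stated objective: faster
-- what changed: Replaces A's positional loops (a substring scan of the other string at every position) with set difference over distinct characters, summing str.count multiplicities, so the per-position rescans disappear.
import Mathlib
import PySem

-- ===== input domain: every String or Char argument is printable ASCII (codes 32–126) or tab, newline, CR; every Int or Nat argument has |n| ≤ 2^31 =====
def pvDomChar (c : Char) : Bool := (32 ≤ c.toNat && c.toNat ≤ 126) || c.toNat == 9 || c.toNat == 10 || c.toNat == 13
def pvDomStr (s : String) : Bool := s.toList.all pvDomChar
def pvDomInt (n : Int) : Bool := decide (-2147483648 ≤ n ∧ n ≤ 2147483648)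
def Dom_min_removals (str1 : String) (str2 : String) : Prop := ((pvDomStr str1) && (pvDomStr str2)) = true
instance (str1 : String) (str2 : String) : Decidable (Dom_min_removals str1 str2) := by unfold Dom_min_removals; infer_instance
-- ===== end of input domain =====

-- B replaces A's positional loops (a substring scan of the other string at every
-- position) by set difference over distinct characters summed with str.count (faster).

-- ===== PORT A =====
-- A's `str1.replace(str1[i],"")` discards its result (Python strings are immutable),
-- so it has no effect on the loop; it is a no-op and ports to nothing.
def min_removals (str1 : String) (str2 : String) : Int :=
  let remove : Int := (PySem.List.pyRange 0 (PySem.Str.len str1) 1).foldl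
    (fun acc i =>
      if PySem.Chars.isIn [PySem.List.pyGetD str1.toList i ' '] str2.toList then acc
      else acc + 1) 0
  let remove : Int := (PySem.List.pyRange 0 (PySem.Str.len str2) 1).foldl
    (fun acc i =>
      if PySem.Chars.isIn [PySem.List.pyGetD str2.toList i ' '] str1.toList then acc
      else acc + 1) remove
  remove

-- ===== PORT B =====
def min_removals_alt (str1 : String) (str2 : String) : Int :=
  let s1 : PySem.Set Char := PySem.Set.ofList str1.toList
  let s2 : PySem.Set Char := PySem.Set.ofList str2.toList
  ((PySem.Set.diff s1 s2).map (fun c => (PySem.Str.count str1 (String.ofList [c]) : Int))).sum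
    + ((PySem.Set.diff s2 s1).map (fun c => (PySem.Str.count str2 (String.ofList [c]) : Int))).sum

-- ===== PRECONDITION & SPEC =====
def Spec_min_removals (str1 : String) (str2 : String) (out : Int) : Prop := out = min_removals_alt str1 str2
instance (str1 : String) (str2 : String) (out : Int) : Decidable (Spec_min_removals str1 str2 out) := by unfold Spec_min_removals; infer_instance

-- ===== CLAIM (what is proved, stated in full; the proofs are below) =====
def Claim_equal_min_removals : Prop := ∀ (str1 : String) (str2 : String), Dom_min_removals str1 str2 → Spec_min_removals str1 str2 (min_removals str1 str2)

-- ===== LEMMAS AND PROOFS =====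

-- single-character substring membership is character membership
theorem pv_isIn_singleton (c : Char) (l : List Char) :
    PySem.Chars.isIn [c] l = l.contains c := by
  by_cases h : c ∈ l
  · have : [c] <:+: l := by
      obtain ⟨s, t, rfl⟩ := List.append_of_mem h
      exact ⟨s, t, by simp⟩
    simp [(PySem.Chars.isIn_iff_infix [c] l).mpr this, h]
  · have : ¬ [c] <:+: l := fun hi => h (hi.subset (List.mem_singleton_self c))
    have h2 : PySem.Chars.isIn [c] l = false := by
      cases hb : PySem.Chars.isIn [c] l
      · rfl
      · exact absurd ((PySem.Chars.isIn_iff_infix [c] l).mp hb) this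
    simp [h2, h]

-- A's loop over one string counts the positions whose character is absent from the other
theorem pv_loopA (s1 : String) (other : List Char) (init : Int) :
    (PySem.List.pyRange 0 (PySem.Str.len s1) 1).foldl
      (fun acc i =>
        if PySem.Chars.isIn [PySem.List.pyGetD s1.toList i ' '] other then acc
        else acc + 1) init
    = init + (s1.toList.countP (fun c => !other.contains c) : Int) := by
  have hlen : PySem.Str.len s1 = PySem.List.len s1.toList := by
    simp [PySem.Str.len_eq, PySem.List.len]
  rw [hlen,
    PySem.List.foldl_pyRange_zero_pyGetD s1.toList ' '
      (fun acc c => if PySem.Chars.isIn [c] other then acc else acc + 1) init]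
  have hfun : (fun (acc : Int) (c : Char) => if PySem.Chars.isIn [c] other then acc else acc + 1)
      = (fun (acc : Int) (c : Char) => if (!other.contains c) then acc + 1 else acc) := by
    funext acc c
    rw [pv_isIn_singleton]
    cases other.contains c <;> simp
  rw [hfun, PySem.List.foldl_if_add_one]

-- disjoint predicates split countP
theorem pv_countP_or (q r : Char → Bool) (s : List Char)
    (hdisj : ∀ x, ¬ (q x = true ∧ r x = true)) :
    s.countP (fun x => q x || r x) = s.countP q + s.countP r := by
  induction s with
  | nil => simp
  | cons a t ih =>
    by_cases hq : q a = true
    · have hr : r a = false := by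
        cases hb : r a
        · rfl
        · exact absurd ⟨hq, hb⟩ (hdisj a)
      simp [hq, hr, ih]; omega
    · have hq' : q a = false := by cases hb : q a; rfl; exact absurd hb hq
      cases hr : r a <;> simp [hq', hr, ih] <;> omega

-- summing the count of each member of a duplicate-free list = counting membership
theorem pv_sum_counts (d : List Char) (s : List Char) (hnd : d.Nodup) :
    ((d.map (fun k => (s.count k : Int))).sum : Int)
      = (s.countP (fun x => decide (x ∈ d)) : Int) := by
  induction d with
  | nil => simp
  | cons c t ih =>
    have hc : c ∉ t := (List.nodup_cons.mp hnd).1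
    have ht : t.Nodup := (List.nodup_cons.mp hnd).2
    have hsplit : s.countP (fun x => decide (x ∈ c :: t))
        = s.countP (fun x => x == c) + s.countP (fun x => decide (x ∈ t)) := by
      have := pv_countP_or (fun x => x == c) (fun x => decide (x ∈ t)) s
        (by
          intro x h
          have hx : x = c := by simpa using h.1
          have hxt : x ∈ t := by simpa using h.2
          exact hc (hx ▸ hxt))
      rw [← this]
      apply List.countP_congr
      intro x _
      simp [List.mem_cons]
    have hcount : s.count c = s.countP (fun x => x == c) := by
      simp [List.count]
    simp only [List.map_cons, List.sum_cons, ih ht, hsplit, hcount]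
    push_cast
    ring
-- PySem substring counting with a single-character pattern is character counting
theorem pv_count_go (c : Char) (l : List Char) (fuel acc : Nat) (h : l.length ≤ fuel) :
    PySem.Chars.count.go [c] fuel l acc = acc + l.count c := by
  induction l generalizing fuel acc with
  | nil => cases fuel <;> simp [PySem.Chars.count.go]
  | cons a t ih =>
    cases fuel with
    | zero => simp at h
    | succ f =>
      have hf : t.length ≤ f := by simpa using h
      by_cases hac : a = c
      · subst hac
        have hcnd : ((a == a && true) = true) := by simp
        simp only [PySem.Chars.count.go, List.isPrefixOf]
        rw [if_pos hcnd]
        simp only [List.length_cons, List.length_nil, Nat.zero_add, List.drop_one,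
          List.tail_cons, List.count_cons_self]
        rw [ih f (acc + 1) hf]
        omega
      · have hca : ¬ c = a := fun hh => hac hh.symm
        have hcnd : ¬ ((c == a && true) = true) := by simp [hca]
        simp only [PySem.Chars.count.go, List.isPrefixOf]
        rw [if_neg hcnd, List.count_cons_of_ne hac]
        exact ih f acc hf

theorem pv_count_singleton (l : List Char) (c : Char) :
    PySem.Chars.count l [c] = l.count c := by
  simp [PySem.Chars.count, pv_count_go c l l.length 0 le_rfl]

-- one side of B equals the per-string count of characters absent from the other string
theorem pv_side (s1 s2 : String) :
    ((PySem.Set.diff (PySem.Set.ofList s1.toList) (PySem.Set.ofList s2.toList)).map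
        (fun c => (PySem.Str.count s1 (String.ofList [c]) : Int))).sum
      = (s1.toList.countP (fun c => !s2.toList.contains c) : Int) := by
  have hmapfn : (fun c => (PySem.Str.count s1 (String.ofList [c]) : Int))
      = fun c : Char => (s1.toList.count c : Int) := by
    funext c
    rw [PySem.Str.count_eq]
    simp [pv_count_singleton]
  rw [hmapfn]
  have hd : PySem.Set.diff (PySem.Set.ofList s1.toList) (PySem.Set.ofList s2.toList)
      = (PySem.Set.ofList s1.toList).filter
          (fun x => !(PySem.Set.ofList s2.toList).contains x) := rfl
  rw [hd]
  have hnd : ((PySem.Set.ofList s1.toList).filter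
      (fun x => !(PySem.Set.ofList s2.toList).contains x)).Nodup :=
    (PySem.Set.nodup_ofList s1.toList).filter _
  rw [pv_sum_counts _ s1.toList hnd]
  congr 1
  apply List.countP_congr
  intro x hx
  have hcont : (PySem.Set.ofList s2.toList).contains x = s2.toList.contains x := by
    by_cases hm : x ∈ s2.toList <;> simp [hm]
  simp only [List.mem_filter, PySem.Set.mem_ofList, decide_eq_true_eq, hcont]
  constructor
  · rintro ⟨-, h⟩; exact h
  · intro h
    exact ⟨by simpa [PySem.Set.mem_ofList] using hx, h⟩

-- ===== VERDICT (by name: the statement is the Claim_ definition above) =====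
theorem min_removals_spec : Claim_equal_min_removals := by
  intro str1 str2 _
  unfold Spec_min_removals min_removals min_removals_alt
  simp only
  rw [pv_loopA str1 str2.toList 0, pv_loopA str2 str1.toList _]
  rw [pv_side str1 str2, pv_side str2 str1]
  ring
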